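-- pv_equiv track=rewrite | github.com/pypi-data/pypi-mirror-333 | packages/stelvio/stelvio-0.1.0a2.tar.gz/stelvio-0.1.0a2/stelvio/aws/api_gateway.py | _generate_handler_file_content
-- ===== SOURCE A (Python) =====
-- from collections import defaultdict
-- from typing import Unpack, final, Literal, TypeAlias, Tuple
--
-- def _generate_handler_file_content(route_map: dict[str, Tuple[str, str]]) -> str:
--     # Track function names and their sources
--     seen_funcs: dict = {}  # func_name -> file
--     func_aliases = {}  # (file, func) -> alias to use
--
--     # Group by file for imports and detect duplicates
--     file_funcs = defaultdict(list)
--     for route_key, (file, func) in route_map.items():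
--         # Check if this function name is already used by a different file
--         if func in seen_funcs and seen_funcs[func] != file:
--             # Create alias for this duplicate
--             alias = f"{func}_{file.replace('/', '_').replace('.', '_')}"
--             func_aliases[(file, func)] = alias
--         else:
--             seen_funcs[func] = file
--
--         if func not in file_funcs[file]:  # Avoid duplicates in imports
--             file_funcs[file].append(func)
--
--     # Generate imports section
--     imports = [
--         "# stlv_routing_handler.py",
--         "# Auto-generated file - do not edit manually",
--         "",
--         "from typing import Any",
--     ]
--
--     # Create import statements
--     for file, funcs in file_funcs.items():
--         import_parts = []
--         for func in funcs:
--             if (file, func) in func_aliases: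
--                 import_parts.append(f"{func} as {func_aliases[(file, func)]}")
--             else:
--                 import_parts.append(func)
--         imports.append(f"from {file} import {', '.join(import_parts)}")
--
--     imports.extend(["", ""])
--
--     # Generate routes dictionary
--     routes_lines = ["ROUTES = {"]
--     for route_key, (file, func) in route_map.items():
--         # Use alias if one exists, otherwise use the function name
--         func_name = func_aliases.get((file, func), func)
--         routes_lines.append(f'    "{route_key}": {func_name},')
--     routes_lines.append("}")
--     routes_lines.append("")
--     routes_lines.append("")
--
--     # Add the standard handler function
--     handler_func = [
--         "import json",
--         "",
--         "def lambda_handler(event: dict[str, Any], context: Any) -> dict[str, Any]:",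
--         '    method = event["httpMethod"]',
--         '    resource = event["resource"]',
--         '    route_key = f"{method} {resource}"',
--         "",
--         "    func = ROUTES.get(route_key)",
--         "    if not func:",
--         "        return {",
--         '            "statusCode": 500,',
--         '            "headers": {"Content-Type": "application/json"},',
--         '            "body": json.dumps({',
--         '                "error": "Route not found",',
--         '                "message": f"No handler for route: {route_key}"',
--         "            })",
--         "        }",
--         "    return func(event, context)",
--         "",
--     ]
--
--     # Combine all sections
--     content = imports + routes_lines + handler_func
--     return "\n".join(content)
-- ===== SOURCE B (Python) =====
-- # Dict-free rewrite: no mutable seen_funcs/func_aliases/file_funcs state; the owner of a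
-- # function name is found by searching the route list, per-file import lists come from
-- # dedup'd filtered scans, and all sections are built as comprehensions (objective: alternative).
-- def _generate_handler_file_content(route_map: dict) -> str:
--     pairs = list(route_map.values())  # [(file, func), ...] in route order
--
--     def dedup(seq):
--         return list(dict.fromkeys(seq))
--
--     def owner(func):
--         # the file of this function name's first occurrence in route order
--         return next(f for f, g in pairs if g == func)
--
--     def alias(file, func):
--         return f"{func}_{file.replace('/', '_').replace('.', '_')}"
--
--     header = [
--         "# stlv_routing_handler.py",
--         "# Auto-generated file - do not edit manually",
--         "",
--         "from typing import Any",
--     ]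
--     import_lines = [
--         "from {} import {}".format(
--             file,
--             ", ".join(
--                 g if owner(g) == file else f"{g} as {alias(file, g)}"
--                 for g in dedup([g for f, g in pairs if f == file])
--             ),
--         )
--         for file in dedup([f for f, _ in pairs])
--     ]
--     route_lines = [
--         f'    "{key}": {func if owner(func) == file else alias(file, func)},'
--         for key, (file, func) in route_map.items()
--     ]
--     footer = [
--         "import json",
--         "",
--         "def lambda_handler(event: dict[str, Any], context: Any) -> dict[str, Any]:",
--         '    method = event["httpMethod"]',
--         '    resource = event["resource"]',
--         '    route_key = f"{method} {resource}"',
--         "",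
--         "    func = ROUTES.get(route_key)",
--         "    if not func:",
--         "        return {",
--         '            "statusCode": 500,',
--         '            "headers": {"Content-Type": "application/json"},',
--         '            "body": json.dumps({',
--         '                "error": "Route not found",',
--         '                "message": f"No handler for route: {route_key}"',
--         "            })",
--         "        }",
--         "    return func(event, context)",
--         "",
--     ]
--     return "\n".join(
--         header + import_lines + ["", "", "ROUTES = {"] + route_lines + ["}", "", ""] + footer
--     )
-- ===== Notes on version B (the rewrite author's own statement) =====
-- stated objective: alternative
-- what changed: A threads three mutable dicts (seen_funcs, func_aliases, file_funcs) through one loop; B keeps no dict state at all: the owner of a function name is re-found by a linear search of the route list (next(...)), per-file import lists are dedup'd filtered scans over the list, and every section is a comprehension.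
import Mathlib
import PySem

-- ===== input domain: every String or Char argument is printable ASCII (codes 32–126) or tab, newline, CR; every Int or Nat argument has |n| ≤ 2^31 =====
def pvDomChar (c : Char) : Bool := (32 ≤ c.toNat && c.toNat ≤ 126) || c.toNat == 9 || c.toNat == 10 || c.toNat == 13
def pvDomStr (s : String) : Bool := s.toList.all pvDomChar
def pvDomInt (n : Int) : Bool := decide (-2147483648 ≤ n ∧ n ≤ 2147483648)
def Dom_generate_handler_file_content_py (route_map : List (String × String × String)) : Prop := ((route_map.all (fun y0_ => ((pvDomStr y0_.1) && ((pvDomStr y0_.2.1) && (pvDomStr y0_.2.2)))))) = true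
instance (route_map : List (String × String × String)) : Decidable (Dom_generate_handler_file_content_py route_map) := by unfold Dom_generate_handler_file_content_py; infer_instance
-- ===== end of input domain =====

-- B keeps none of A's three mutable dicts: the first-occurrence owner of a function name is
-- re-found by a linear search of the route list and the sections are comprehensions over
-- dedup'd scans (objective: alternative — a dict-free quadratic algorithm, not faster).

-- fixed text blocks (literal in both Pythons) and the alias format
def pvHeaderLines : List String :=
  ["# stlv_routing_handler.py",
   "# Auto-generated file - do not edit manually",
   "",
   "from typing import Any"]

def pvHandlerLines : List String :=
  ["import json",
   "",
   "def lambda_handler(event: dict[str, Any], context: Any) -> dict[str, Any]:",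
   "    method = event[\"httpMethod\"]",
   "    resource = event[\"resource\"]",
   "    route_key = f\"{method} {resource}\"",
   "",
   "    func = ROUTES.get(route_key)",
   "    if not func:",
   "        return {",
   "            \"statusCode\": 500,",
   "            \"headers\": {\"Content-Type\": \"application/json\"},",
   "            \"body\": json.dumps({",
   "                \"error\": \"Route not found\",",
   "                \"message\": f\"No handler for route: {route_key}\"",
   "            })",
   "        }",
   "    return func(event, context)",
   ""]

-- f"{func}_{file.replace('/', '_').replace('.', '_')}"
def pvAliasName (file func : String) : String :=
  func ++ "_" ++ (PySem.Str.replace (PySem.Str.replace file "/" "_") "." "_")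

-- ===== PORT A =====
-- one iteration of A's first loop over route_map.items(): state = (seen_funcs, func_aliases, file_funcs)
def pvStepA
    (st : PySem.Dict String String × PySem.Dict (String × String) String × PySem.Dict String (List String))
    (r : String × String × String) :
    PySem.Dict String String × PySem.Dict (String × String) String × PySem.Dict String (List String) :=
  let seen_aliases :=
    match st.1.get? r.2.2 with          -- if func in seen_funcs and seen_funcs[func] != file
    | some f =>
        if f ≠ r.2.1 then (st.1, st.2.1.insert (r.2.1, r.2.2) (pvAliasName r.2.1 r.2.2))
        else (st.1.insert r.2.2 r.2.1, st.2.1)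
    | none => (st.1.insert r.2.2 r.2.1, st.2.1)
  -- the defaultdict access creates the entry; append func if not already present
  (seen_aliases.1, seen_aliases.2,
   st.2.2.insert r.2.1
     (if r.2.2 ∈ st.2.2.getD r.2.1 [] then st.2.2.getD r.2.1 []
      else st.2.2.getD r.2.1 [] ++ [r.2.2]))

def generate_handler_file_content_py (route_map : List (String × String × String)) : String :=
  let st := route_map.foldl pvStepA (PySem.Dict.empty, PySem.Dict.empty, PySem.Dict.empty)
  let func_aliases := st.2.1
  let file_funcs := st.2.2
  let imports := file_funcs.items.foldl
    (fun acc p =>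
      let import_parts := p.2.foldl
        (fun parts func =>
          match func_aliases.get? (p.1, func) with   -- if (file, func) in func_aliases
          | some a => parts ++ [func ++ " as " ++ a]
          | none => parts ++ [func])
        []
      acc ++ ["from " ++ p.1 ++ " import " ++ PySem.Str.join ", " import_parts])
    pvHeaderLines
  let imports := imports ++ ["", ""]
  let routes_lines := route_map.foldl
    (fun acc r =>
      acc ++ ["    \"" ++ r.1 ++ "\": " ++ func_aliases.getD (r.2.1, r.2.2) r.2.2 ++ ","])
    ["ROUTES = {"]
  let routes_lines := routes_lines ++ ["}", "", ""]
  PySem.Str.join "\n" (imports ++ routes_lines ++ pvHandlerLines)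

-- ===== PORT B =====
-- owner(func) = next(f for f, g in pairs if g == func); every call site passes a func that
-- occurs in pairs, so Python's StopIteration is unreachable and the none branch is dead code
def pvOwner (pairs : List (String × String)) (func : String) : String :=
  match pairs.find? (fun p => p.2 == func) with
  | some p => p.1
  | none => ""

-- dedup = list(dict.fromkeys(seq)) is PySem.List.dedup (first occurrences, in order)
def generate_handler_file_content_py_alt (route_map : List (String × String × String)) : String :=
  let pairs := route_map.map (fun r => r.2)
  let import_lines :=
    (PySem.List.dedup (pairs.map Prod.fst)).map (fun file =>
      "from " ++ file ++ " import " ++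
        PySem.Str.join ", "
          ((PySem.List.dedup ((pairs.filter (fun p => p.1 == file)).map Prod.snd)).map
            (fun g => if pvOwner pairs g = file then g
                      else g ++ " as " ++ pvAliasName file g)))
  let route_lines :=
    route_map.map (fun r =>
      "    \"" ++ r.1 ++ "\": "
        ++ (if pvOwner pairs r.2.2 = r.2.1 then r.2.2 else pvAliasName r.2.1 r.2.2) ++ ",")
  PySem.Str.join "\n"
    (pvHeaderLines ++ import_lines ++ ["", "", "ROUTES = {"] ++ route_lines
      ++ ["}", "", ""] ++ pvHandlerLines)

-- ===== PRECONDITION & SPEC =====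
-- A is total (no Pre_): the route keys only ever appear verbatim in the ROUTES lines,
-- so both ports agree on every association list, dict-shaped or not.
def Spec_generate_handler_file_content_py (route_map : List (String × String × String)) (out : String) : Prop := out = generate_handler_file_content_py_alt route_map
instance (route_map : List (String × String × String)) (out : String) : Decidable (Spec_generate_handler_file_content_py route_map out) := by unfold Spec_generate_handler_file_content_py; infer_instance

-- ===== CLAIM (what is proved, stated in full; the proofs are below) =====
def Claim_equal_generate_handler_file_content_py : Prop := ∀ (route_map : List (String × String × String)), Dom_generate_handler_file_content_py route_map → Spec_generate_handler_file_content_py route_map (generate_handler_file_content_py route_map)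

-- ===== LEMMAS AND PROOFS =====

-- proof-side characterizations of A's loop state
def pvFirstFile (route_map : List (String × String × String)) : PySem.Dict String String :=
  route_map.foldl (fun d r => d.setdefault r.2.2 r.2.1) PySem.Dict.empty

def pvFileFuncs (route_map : List (String × String × String)) : PySem.Dict String (List String) :=
  route_map.foldl
    (fun d r =>
      d.insert r.2.1
        (if r.2.2 ∈ d.getD r.2.1 [] then d.getD r.2.1 [] else d.getD r.2.1 [] ++ [r.2.2]))
    PySem.Dict.empty

-- the per-file ordered-unique function list B computes
def pvFuncsOf (route_map : List (String × String × String)) (file : String) : List String :=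
  PySem.List.dedup (((route_map.map (fun r => r.2)).filter (fun p => p.1 == file)).map Prod.snd)

theorem dict_insert_self_of_get? {κ ν : Type} [BEq κ] [LawfulBEq κ] (d : PySem.Dict κ ν) (k : κ) (v : ν)
    (hnd : d.keys.Nodup) (h : d.get? k = some v) : d.insert k v = d := by
  apply PySem.Dict.ext
  rw [PySem.Dict.items_insert_of_contains]
  · have : ∀ p ∈ d.items, (if p.1 == k then (k, v) else p) = p := by
      intro p hp
      by_cases hk : p.1 = k
      · have hm : (k, p.2) ∈ d.items := by rw [← hk]; exact hp
        have h2 : d.getD k v = p.2 := PySem.Dict.getD_of_mem_items (d := d) hm hnd v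
        have h3 : d.getD k v = v := by simp [PySem.Dict.getD, h]
        have hv : p.2 = v := by rw [← h2, h3]
        cases p with
        | mk a b => simp only at hk hv; simp [hk, hv]
      · simp [hk]
    exact (List.map_congr_left this).trans (List.map_id d.items)
  · rw [PySem.Dict.contains_eq_isSome_get?, h]; rfl

theorem pvFirstFile_append (xs : List (String × String × String)) (r : String × String × String) :
    pvFirstFile (xs ++ [r]) = (pvFirstFile xs).setdefault r.2.2 r.2.1 := by
  simp [pvFirstFile, List.foldl_append]

theorem pvFileFuncs_append (xs : List (String × String × String)) (r : String × String × String) :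
    pvFileFuncs (xs ++ [r]) =
      (pvFileFuncs xs).insert r.2.1
        (if r.2.2 ∈ (pvFileFuncs xs).getD r.2.1 [] then (pvFileFuncs xs).getD r.2.1 []
         else (pvFileFuncs xs).getD r.2.1 [] ++ [r.2.2]) := by
  simp [pvFileFuncs, List.foldl_append]

theorem nodup_keys_pvFirstFile (xs : List (String × String × String)) :
    (pvFirstFile xs).keys.Nodup := by
  induction xs using List.reverseRecOn with
  | nil => simp [pvFirstFile]
  | append_singleton xs r ih =>
    rw [pvFirstFile_append]
    by_cases h : (pvFirstFile xs).contains r.2.2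
    · rw [PySem.Dict.setdefault_of_contains _ _ h]; exact ih
    · rw [PySem.Dict.setdefault_of_not_contains _ _ (by simpa using h)]
      exact PySem.Dict.nodup_keys_insert _ _ _ ih

theorem pvFirstFile_none_iff (xs : List (String × String × String)) (func : String) :
    (pvFirstFile xs).get? func = none ↔ func ∉ xs.map (fun r => r.2.2) := by
  induction xs using List.reverseRecOn with
  | nil => simp [pvFirstFile, PySem.Dict.get?_empty]
  | append_singleton xs r ih =>
    rw [pvFirstFile_append]
    by_cases h : (pvFirstFile xs).contains r.2.2
    · rw [PySem.Dict.setdefault_of_contains _ _ h]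
      simp only [List.map_append, List.map_cons, List.map_nil, List.mem_append, List.mem_singleton]
      constructor
      · intro h0
        rcases ih.mp h0 with h1
        intro hc
        rcases hc with hc | hc
        · exact h1 hc
        · subst hc
          rw [PySem.Dict.contains_eq_isSome_get?] at h
          rw [h0] at h; simp at h
      · intro h0; exact ih.mpr (fun hm => h0 (Or.inl hm))
    · rw [PySem.Dict.setdefault_of_not_contains _ _ (by simpa using h)]
      by_cases hk : func = r.2.2
      · subst hk
        rw [PySem.Dict.get?_insert_self]
        simp
      · rw [PySem.Dict.get?_insert_of_ne _ _ hk]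
        simp only [List.map_append, List.map_cons, List.map_nil, List.mem_append, List.mem_singleton]
        rw [ih]
        constructor
        · intro h1 hc; rcases hc with hc | hc
          · exact h1 hc
          · exact hk hc
        · intro h1 hm; exact h1 (Or.inl hm)

theorem pair_mem_funcs (xs : List (String × String × String)) (file func : String)
    (h : (file, func) ∈ xs.map (fun r => r.2)) : func ∈ xs.map (fun r => r.2.2) := by
  rcases List.mem_map.mp h with ⟨r, hr, he⟩
  exact List.mem_map.mpr ⟨r, hr, by rw [he]⟩

theorem pvStateA (xs : List (String × String × String)) :
    (xs.foldl pvStepA (PySem.Dict.empty, PySem.Dict.empty, PySem.Dict.empty)).1 = pvFirstFile xs ∧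
    (xs.foldl pvStepA (PySem.Dict.empty, PySem.Dict.empty, PySem.Dict.empty)).2.2 = pvFileFuncs xs ∧
    ∀ file func,
      (xs.foldl pvStepA (PySem.Dict.empty, PySem.Dict.empty, PySem.Dict.empty)).2.1.get? (file, func) =
        if (file, func) ∈ xs.map (fun r => r.2) ∧ (pvFirstFile xs).get? func ≠ some file
        then some (pvAliasName file func) else none := by
  induction xs using List.reverseRecOn with
  | nil =>
    refine ⟨rfl, rfl, ?_⟩
    intro file func
    simp [pvFirstFile, PySem.Dict.get?_empty]
  | append_singleton xs r ih =>
    obtain ⟨h1, h2, h3⟩ := ih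
    rw [List.foldl_append, List.foldl_cons, List.foldl_nil]
    set S := xs.foldl pvStepA (PySem.Dict.empty, PySem.Dict.empty, PySem.Dict.empty) with hS
    refine ⟨?_, ?_, ?_⟩
    · -- seen component
      rw [pvFirstFile_append]
      simp only [pvStepA]
      rcases hg : S.1.get? r.2.2 with _ | f
      · simp only
        rw [PySem.Dict.setdefault_of_not_contains _ _
            (by rw [PySem.Dict.contains_eq_isSome_get?, ← h1, hg]; rfl), h1]
      · by_cases hf : f = r.2.1
        · simp only [hf, ne_eq, not_true_eq_false, if_false]
          rw [PySem.Dict.setdefault_of_contains _ _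
            (by rw [PySem.Dict.contains_eq_isSome_get?, ← h1, hg]; rfl)]
          rw [← h1]
          exact dict_insert_self_of_get? S.1 r.2.2 r.2.1 (h1 ▸ nodup_keys_pvFirstFile xs) (hf ▸ hg)
        · simp only [ne_eq, hf, not_false_eq_true, if_true]
          rw [PySem.Dict.setdefault_of_contains _ _
            (by rw [PySem.Dict.contains_eq_isSome_get?, ← h1, hg]; rfl)]
          exact h1
    · -- file_funcs component
      simp only [pvStepA]
      rw [pvFileFuncs_append, ← h2]
    · -- aliases component
      intro file func
      rw [pvFirstFile_append]
      simp only [pvStepA]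
      simp only [List.map_append, List.map_cons, List.map_nil, List.mem_append,
        List.mem_singleton]
      rcases hg : S.1.get? r.2.2 with _ | f
      · -- func₀ unseen: aliases unchanged, first_file gains r.2.2 ↦ r.2.1
        have hnone : (pvFirstFile xs).get? r.2.2 = none := by rw [← h1]; exact hg
        have hnotin : r.2.2 ∉ xs.map (fun r => r.2.2) := (pvFirstFile_none_iff xs r.2.2).mp hnone
        simp only
        rw [PySem.Dict.setdefault_of_not_contains _ _
            (by rw [PySem.Dict.contains_eq_isSome_get?, hnone]; rfl)]
        rw [h3 file func]
        by_cases hfu : func = r.2.2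
        · subst hfu
          have hmem : (file, r.2.2) ∉ xs.map (fun r => r.2) := fun hc => hnotin (pair_mem_funcs xs file r.2.2 hc)
          rw [PySem.Dict.get?_insert_self]
          rw [if_neg (by intro hc; exact hmem hc.1)]
          by_cases hp : (file, r.2.2) = r.2
          · have hfile : file = r.2.1 := congrArg Prod.fst hp
            rw [if_neg (by intro hc; exact hc.2 (by rw [hfile]))]
          · rw [if_neg (by intro hc; rcases hc.1 with hc1 | hc1; exact hmem hc1; exact hp hc1)]
        · rw [PySem.Dict.get?_insert_of_ne _ _ hfu]
          have hp : ¬ ((file, func) = r.2) := by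
            intro hc; exact hfu (congrArg (fun p => p.2) hc)
          by_cases hm : (file, func) ∈ xs.map (fun r => r.2)
          · simp only [hm, hp, or_false, true_and]
          · simp only [hm, hp, or_false, false_and, if_false]
      · -- func₀ seen with first file f
        have hgf : (pvFirstFile xs).get? r.2.2 = some f := by rw [← h1]; exact hg
        rw [PySem.Dict.setdefault_of_contains _ _
            (by rw [PySem.Dict.contains_eq_isSome_get?, hgf]; rfl)]
        by_cases hf : f = r.2.1
        · -- same file: no alias added
          simp only [hf, ne_eq, not_true_eq_false, if_false]
          rw [h3 file func]
          by_cases hp : (file, func) = r.2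
          · have hfile : file = r.2.1 := congrArg Prod.fst hp
            have hfunc : func = r.2.2 := congrArg (fun p => p.2) hp
            have hgt : (pvFirstFile xs).get? func = some file := by
              rw [hfunc, hgf, hf, hfile]
            rw [if_neg (by intro hc; exact hc.2 hgt), if_neg (by intro hc; exact hc.2 hgt)]
          · by_cases hm : (file, func) ∈ xs.map (fun r => r.2)
            · simp only [hm, hp, or_false, true_and]
            · simp only [hm, hp, or_false, false_and, if_false]
        · -- different file: alias for (r.2.1, r.2.2) added
          simp only [ne_eq, hf, not_false_eq_true, if_true]
          rw [PySem.Dict.get?_insert]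
          by_cases hp : (file, func) = (r.2.1, r.2.2)
          · rw [if_pos hp]
            have hfile : file = r.2.1 := congrArg Prod.fst hp
            have hfunc : func = r.2.2 := congrArg Prod.snd hp
            have : (pvFirstFile xs).get? func = some f := by rw [hfunc]; exact hgf
            rw [if_pos ⟨Or.inr (by rw [hp]), by rw [this]; intro hc; exact hf (by rw [Option.some_inj] at hc; rw [hc, hfile])⟩]
            rw [hfile, hfunc]
          · rw [if_neg hp, h3 file func]
            by_cases hm : (file, func) ∈ xs.map (fun r => r.2)
            · simp only [hm, hp, or_false, true_and]
            · simp only [hm, hp, or_false, false_and, if_false]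

theorem nodup_keys_pvFileFuncs (xs : List (String × String × String)) :
    (pvFileFuncs xs).keys.Nodup := by
  exact PySem.Dict.nodup_keys_foldl_insert_key xs (fun r => r.2.1)
    (fun d r => if r.2.2 ∈ d.getD r.2.1 [] then d.getD r.2.1 [] else d.getD r.2.1 [] ++ [r.2.2])
    PySem.Dict.empty (by simp)

theorem pvAlias_get?_eq (rm : List (String × String × String)) (file func : String)
    (hm : (file, func) ∈ rm.map (fun r => r.2)) :
    (rm.foldl pvStepA (PySem.Dict.empty, PySem.Dict.empty, PySem.Dict.empty)).2.1.get? (file, func) =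
      (if (pvFirstFile rm).getD func file = file then none else some (pvAliasName file func)) := by
  obtain ⟨h1, h2, h3⟩ := pvStateA rm
  rcases hg : (pvFirstFile rm).get? func with _ | f0
  · exact absurd (pair_mem_funcs rm file func hm) (fun hc => ((pvFirstFile_none_iff rm func).mp hg) hc)
  · have hgd : (pvFirstFile rm).getD func file = f0 := by
      rw [PySem.Dict.getD_eq_get?_getD, hg]; rfl
    rw [h3 file func, hgd]
    by_cases hf : f0 = file
    · rw [if_pos hf, if_neg (fun hc => hc.2 (by rw [hg, hf]))]
    · rw [if_neg hf, if_pos ⟨hm, by rw [hg]; intro hc; exact hf (Option.some_inj.mp hc)⟩]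

-- dedup of a snoc: dict.fromkeys keeps first occurrences
theorem pvDedup_append (xs : List String) (x : String) :
    PySem.List.dedup (xs ++ [x]) =
      if x ∈ xs then PySem.List.dedup xs else PySem.List.dedup xs ++ [x] := by
  simp only [PySem.List.dedup_eq_ofList, PySem.Set.ofList_append, PySem.Set.update_cons,
    PySem.Set.update_nil]
  unfold PySem.Set.add
  simp [PySem.Set.mem_ofList]

-- pvFirstFile's lookup is the first-occurrence search B performs
theorem pvFirstFile_find? (rm : List (String × String × String)) (func : String) :
    (pvFirstFile rm).get? func =
      ((rm.map (fun r => r.2)).find? (fun p => p.2 == func)).map Prod.fst := by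
  induction rm using List.reverseRecOn with
  | nil => simp [pvFirstFile, PySem.Dict.get?_empty]
  | append_singleton xs r ih =>
    rw [pvFirstFile_append, List.map_append, List.find?_append]
    by_cases hk : func = r.2.2
    · subst hk
      rw [PySem.Dict.get?_setdefault_self, ih]
      rcases hf : (xs.map (fun x => x.2)).find? (fun p => p.2 == r.2.2) with _ | p
      · rw [hf]; simp
      · rw [hf]; simp
    · rw [PySem.Dict.get?_setdefault_of_ne _ _ hk, ih]
      simp only [List.map_cons, List.map_nil]
      have hsing : (([r.2] : List (String × String)).find? (fun p => p.2 == func)) = none := by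
        simp [Ne.symm hk]
      rw [hsing]
      simp

theorem pvOwner_get? (rm : List (String × String × String)) (func : String)
    (h : ∃ p ∈ rm.map (fun r => r.2), p.2 = func) :
    (pvFirstFile rm).get? func = some (pvOwner (rm.map (fun r => r.2)) func) := by
  rw [pvFirstFile_find?]
  rcases hf : (rm.map (fun r => r.2)).find? (fun p => p.2 == func) with _ | p
  · exfalso
    rcases h with ⟨q, hq, he⟩
    have := List.find?_eq_none.mp hf q hq
    simp [he] at this
  · simp [pvOwner, hf]

theorem pvOwner_getD (rm : List (String × String × String)) (file func : String)
    (h : ∃ p ∈ rm.map (fun r => r.2), p.2 = func) :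
    (pvFirstFile rm).getD func file = pvOwner (rm.map (fun r => r.2)) func := by
  rw [PySem.Dict.getD_eq_get?_getD, pvOwner_get? rm func h]; rfl

-- filter of a list whose firsts avoid x is empty
theorem pvFilter_nil (ps : List (String × String)) (x : String)
    (h : x ∉ ps.map Prod.fst) : ps.filter (fun p => p.1 == x) = [] := by
  rw [List.filter_eq_nil_iff]
  intro p hp
  simp only [beq_iff_eq]
  intro hc
  exact h (List.mem_map.mpr ⟨p, hp, hc⟩)

-- A's file_funcs dict IS B's (dedup'd file list, per-file dedup'd filtered funcs)
theorem pvFileFuncs_items (rm : List (String × String × String)) :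
    (pvFileFuncs rm).items =
      (PySem.List.dedup ((rm.map (fun r => r.2)).map Prod.fst)).map
        (fun f => (f, pvFuncsOf rm f)) := by
  induction rm using List.reverseRecOn with
  | nil => rfl
  | append_singleton xs r ih =>
    have hkeys : (pvFileFuncs xs).keys =
        PySem.List.dedup ((xs.map (fun r => r.2)).map Prod.fst) := by
      simp only [PySem.Dict.keys, ih, List.map_map]
      exact List.map_id _
    have hpair : ((xs ++ [r]).map (fun r => r.2)) = xs.map (fun r => r.2) ++ [r.2] := by
      simp
    have hfu_ne : ∀ f, f ≠ r.2.1 → pvFuncsOf (xs ++ [r]) f = pvFuncsOf xs f := by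
      intro f hf
      simp only [pvFuncsOf, hpair, List.filter_append]
      have hbe : (r.2.1 == f) = false := by
        simp [Ne.symm hf]
      have hemp : ([r.2] : List (String × String)).filter (fun p => p.1 == f) = [] := by
        simp [hbe]
      rw [hemp, List.append_nil]
    have hfu_eq : pvFuncsOf (xs ++ [r]) r.2.1 =
        if r.2.2 ∈ pvFuncsOf xs r.2.1 then pvFuncsOf xs r.2.1
        else pvFuncsOf xs r.2.1 ++ [r.2.2] := by
      simp only [pvFuncsOf, hpair, List.filter_append]
      have : ([r.2] : List (String × String)).filter (fun p => p.1 == r.2.1) = [r.2] := by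
        simp
      rw [this, List.map_append]
      simp only [List.map_cons, List.map_nil]
      rw [pvDedup_append]
      by_cases hm : r.2.2 ∈ ((xs.map (fun x => x.2)).filter (fun p => p.1 == r.2.1)).map Prod.snd
      · rw [if_pos hm, if_pos ((PySem.List.mem_dedup _ _).mpr hm)]
      · rw [if_neg hm, if_neg (fun hcx => hm ((PySem.List.mem_dedup _ _).mp hcx))]
    rw [pvFileFuncs_append]
    by_cases hc : r.2.1 ∈ (xs.map (fun r => r.2)).map Prod.fst
    · -- existing file: entry replaced in place
      have hcont : (pvFileFuncs xs).contains r.2.1 = true := by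
        rw [PySem.Dict.contains_eq_decide_mem_keys, hkeys]
        exact decide_eq_true ((PySem.List.mem_dedup _ _).mpr hc)
      have hgetD : (pvFileFuncs xs).getD r.2.1 [] = pvFuncsOf xs r.2.1 := by
        refine PySem.Dict.getD_of_mem_items (d := pvFileFuncs xs) ?_ (nodup_keys_pvFileFuncs xs) []
        rw [ih]
        exact List.mem_map.mpr ⟨r.2.1, (PySem.List.mem_dedup _ _).mpr hc, rfl⟩
      rw [PySem.Dict.items_insert_of_contains _ _ hcont, ih, List.map_map]
      rw [hpair, List.map_append]
      simp only [List.map_cons, List.map_nil]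
      rw [pvDedup_append, if_pos hc]
      apply List.map_congr_left
      intro f hf
      simp only [Function.comp]
      by_cases hfr : f = r.2.1
      · subst hfr
        simp only [beq_self_eq_true, if_true]
        rw [hgetD, hfu_eq]
      · simp only [beq_iff_eq, hfr, if_false]
        rw [hfu_ne f hfr]
    · -- new file: entry appended, its old func list is empty
      have hcont : (pvFileFuncs xs).contains r.2.1 = false := by
        rw [PySem.Dict.contains_eq_decide_mem_keys, hkeys]
        exact decide_eq_false (fun hmem => hc ((PySem.List.mem_dedup _ _).mp hmem))
      have hgetD : (pvFileFuncs xs).getD r.2.1 [] = [] :=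
        PySem.Dict.getD_of_not_contains _ _ hcont
      have hold : pvFuncsOf xs r.2.1 = [] := by
        rw [pvFuncsOf, pvFilter_nil _ _ hc]
        rfl
      rw [PySem.Dict.items_insert_of_not_contains _ _ hcont, ih]
      rw [hpair, List.map_append]
      simp only [List.map_cons, List.map_nil]
      rw [pvDedup_append, if_neg hc, List.map_append]
      simp only [List.map_cons, List.map_nil]
      rw [hgetD, hfu_eq, hold]
      simp only [List.not_mem_nil, if_false, List.nil_append]
      congr 1
      apply List.map_congr_left
      intro f hf
      have hfr : f ≠ r.2.1 := by
        intro hcx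
        exact hc (by rw [← hcx]; exact (PySem.List.mem_dedup _ _).mp hf)
      rw [hfu_ne f hfr]

-- every function in B's per-file list occurs with that file in the route list
theorem pvFuncsOf_mem (rm : List (String × String × String)) (file func : String)
    (h : func ∈ pvFuncsOf rm file) : (file, func) ∈ rm.map (fun r => r.2) := by
  rw [pvFuncsOf, PySem.List.mem_dedup] at h
  rcases List.mem_map.mp h with ⟨p, hp, he⟩
  rcases List.mem_filter.mp hp with ⟨hpm, hpf⟩
  have : p = (file, func) := by
    cases p
    simp only [beq_iff_eq] at hpf
    simp_all
  rw [← this]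
  exact hpm

theorem pv_main (rm : List (String × String × String)) :
    generate_handler_file_content_py rm = generate_handler_file_content_py_alt rm := by
  obtain ⟨h1, h2, h3⟩ := pvStateA rm
  simp only [generate_handler_file_content_py, generate_handler_file_content_py_alt]
  apply congrArg
  -- routes loop → B's route_lines map
  rw [PySem.List.foldl_congr_mem' rm _
      (fun acc r => acc ++ ["    \"" ++ r.1 ++ "\": "
        ++ (if pvOwner (rm.map (fun x => x.2)) r.2.2 = r.2.1 then r.2.2
            else pvAliasName r.2.1 r.2.2) ++ ","])
      ["ROUTES = {"]
      (by
        intro r hr acc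
        have hm : (r.2.1, r.2.2) ∈ rm.map (fun x => x.2) := List.mem_map_of_mem hr
        have hex : ∃ p ∈ rm.map (fun x => x.2), p.2 = r.2.2 := ⟨(r.2.1, r.2.2), hm, rfl⟩
        rw [PySem.Dict.getD_eq_get?_getD, pvAlias_get?_eq rm r.2.1 r.2.2 hm,
          pvOwner_getD rm r.2.1 r.2.2 hex]
        by_cases hcnd : pvOwner (rm.map (fun x => x.2)) r.2.2 = r.2.1
        · simp [hcnd]
        · simp [hcnd])]
  rw [PySem.List.foldl_append_singleton_eq_map]
  rw [h2]
  -- imports loop → B's import_lines map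
  rw [PySem.List.foldl_append_singleton_eq_map]
  rw [pvFileFuncs_items rm, List.map_map]
  have hmapeq :
      ((PySem.List.dedup ((rm.map (fun r => r.2)).map Prod.fst)).map
        ((fun p =>
          "from " ++ p.1 ++ " import " ++
            PySem.Str.join ", "
              (List.foldl
                (fun parts func =>
                  match
                    (List.foldl pvStepA (PySem.Dict.empty, PySem.Dict.empty, PySem.Dict.empty) rm).2.1.get?
                      (p.1, func) with
                  | some a => parts ++ [func ++ " as " ++ a]
                  | none => parts ++ [func])
                [] p.2)) ∘ (fun f => (f, pvFuncsOf rm f)))) =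
      (PySem.List.dedup ((rm.map (fun r => r.2)).map Prod.fst)).map (fun file =>
        "from " ++ file ++ " import " ++
          PySem.Str.join ", "
            ((PySem.List.dedup
                (((rm.map (fun r => r.2)).filter (fun p => p.1 == file)).map Prod.snd)).map
              (fun g => if pvOwner (rm.map (fun r => r.2)) g = file then g
                        else g ++ " as " ++ pvAliasName file g))) := by
    apply List.map_congr_left
    intro f hf
    simp only [Function.comp]
    congr 1
    rw [PySem.List.foldl_congr_mem' (pvFuncsOf rm f) _
        (fun parts g => parts ++
          [if pvOwner (rm.map (fun r => r.2)) g = f then g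
           else g ++ " as " ++ pvAliasName f g]) []
        (by
          intro g hg parts
          have hm : (f, g) ∈ rm.map (fun r => r.2) := pvFuncsOf_mem rm f g hg
          have hex : ∃ p ∈ rm.map (fun r => r.2), p.2 = g := ⟨(f, g), hm, rfl⟩
          rw [pvAlias_get?_eq rm f g hm, pvOwner_getD rm f g hex]
          by_cases hcnd : pvOwner (rm.map (fun r => r.2)) g = f
          · simp [hcnd]
          · simp [hcnd])]
    rw [PySem.List.foldl_append_singleton_eq_map]
    simp [pvFuncsOf]
  rw [hmapeq]
  simp [List.append_assoc]

-- ===== VERDICT (by name: the statement is the Claim_ definition above) =====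
theorem generate_handler_file_content_py_spec : Claim_equal_generate_handler_file_content_py := by
  intro route_map _
  exact pv_main route_map
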